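-- pv_equiv track=rewrite | github.com/pypi-data/pypi-code-3 | noc/noc-0.7(3).tar.gz/lib/text.py | replace_re_group
-- ===== SOURCE A (Python) =====
-- def replace_re_group(expr,group,pattern):
--     """
--     >>> replace_re_group("nothing","(?P<groupname>","groupvalue")
--     'nothing'
--     >>> replace_re_group("the (?P<groupname>simple) test","(?P<groupname>","groupvalue")
--     'the groupvalue test'
--     >>> replace_re_group("the (?P<groupname> nested (test)>)","(?P<groupname>","groupvalue")
--     'the groupvalue'
--     """
--     r=""
--     lg=len(group)
--     while expr:
--         idx=expr.find(group)
--         if idx==-1: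
--             return r+expr # No more groups found
--         r+=expr[:idx]
--         expr=expr[idx+lg:]
--         level=1 # Level of parenthesis nesting
--         while expr:
--             c=expr[0]
--             expr=expr[1:]
--             if c=="\\":
--                 # Skip quoted character
--                 expr=expr[1:]
--                 continue
--             elif c=="(":
--                 # Increase nesting level
--                 level+=1
--                 continue
--             elif c==")":
--                 # Decrease nesting level
--                 level-=1
--                 if level==0:
--                     # Replace with pattern and search for next
--                     r+=pattern
--                     break
--     return r+expr
-- ===== SOURCE B (Python) =====
-- def replace_re_group(expr, group, pattern):
--     out = []
--     i = 0
--     n = len(expr)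
--     level = 0
--     while i < n:
--         if level == 0:
--             if expr.startswith(group, i):
--                 level = 1
--                 i += len(group)
--             else:
--                 out.append(expr[i])
--                 i += 1
--         else:
--             c = expr[i]
--             if c == "\\":
--                 i += 2
--             elif c == "(":
--                 level += 1
--                 i += 1
--             elif c == ")":
--                 level -= 1
--                 i += 1
--                 if level == 0:
--                     out.append(pattern)
--             else:
--                 i += 1
--     return "".join(out)
-- ===== Notes on version B (the rewrite author's own statement) =====
-- stated objective: simpler
-- what changed: A's nested while-loops (repeated str.find plus a separate consuming inner loop that reslices the string) are replaced by one flat index scan with a single nesting-level state variable (0 = outside a group, >0 = inside), emitting chars, the pattern on a balanced close, and nothing for unclosed groups.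
import Mathlib
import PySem

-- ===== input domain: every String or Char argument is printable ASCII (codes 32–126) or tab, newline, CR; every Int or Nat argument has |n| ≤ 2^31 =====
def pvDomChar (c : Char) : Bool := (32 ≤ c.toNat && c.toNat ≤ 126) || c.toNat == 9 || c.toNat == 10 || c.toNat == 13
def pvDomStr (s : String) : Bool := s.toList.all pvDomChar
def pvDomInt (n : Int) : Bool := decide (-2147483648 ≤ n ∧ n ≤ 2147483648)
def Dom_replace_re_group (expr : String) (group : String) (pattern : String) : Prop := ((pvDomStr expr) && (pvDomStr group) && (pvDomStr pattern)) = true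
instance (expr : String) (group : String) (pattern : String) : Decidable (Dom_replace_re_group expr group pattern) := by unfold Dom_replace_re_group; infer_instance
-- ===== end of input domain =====

-- B replaces A's nested find+consume loops by one flat scan with a nesting-level state variable (objective: simpler decomposition, same cost).

-- ===== PORT A =====
-- A's inner `while expr:` loop (level starts at 1): consumes chars, skipping an
-- escaped char after '\', tracking nesting; `some rest` = the break at level 0
-- (rest is what is left), `none` = the loop exhausted expr without closing.
-- (The '\' arm matches one level deeper so the recursion is structural: a '\'
-- ending the string leaves expr = "", on which the while loop exits = none.)
def pvInnerA : List Char → Int → Option (List Char)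
  | [], _ => none
  | c :: rest, level =>
    if c = '\\' then
      match rest with
      | [] => none
      | _ :: r2 => pvInnerA r2 level
    else if c = '(' then pvInnerA rest (level + 1)
    else if c = ')' then
      (if level - 1 = 0 then some rest else pvInnerA rest (level - 1))
    else pvInnerA rest level

-- A's outer `while expr:` loop, accumulator r; find/take/drop as in the Python.
-- Structural on a fuel argument (expr shrinks strictly each iteration, so
-- expr.length + 1 units of fuel are always enough; fuel 0 is never reached).
def pvOuterAF (group pattern : List Char) : Nat → List Char → List Char → List Char
  | 0, r, _ => r
  | fuel + 1, r, expr =>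
    if expr = [] then r
    else
      let idx := PySem.Chars.find expr group
      if idx = -1 then r ++ expr
      else
        match pvInnerA (expr.drop (idx.toNat + group.length)) 1 with
        | none => r ++ expr.take idx.toNat   -- inner loop exhausted expr; outer loop exits, expr = ""
        | some rest => pvOuterAF group pattern fuel (r ++ expr.take idx.toNat ++ pattern) rest

def replace_re_group (expr : String) (group : String) (pattern : String) : String :=
  String.ofList (pvOuterAF group.toList pattern.toList (expr.toList.length + 1) [] expr.toList)

-- ===== PORT B =====
-- one flat scan (Source B): level = 0 outside a matched group, > 0 inside.
-- Structural on fuel: each step consumes a char except a zero-length group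
-- match, which flips level 0 → 1, so 2·length + 2 units are always enough.
def pvGoBF (group pattern : List Char) : Nat → List Char → Int → List Char
  | 0, _, _ => []
  | fuel + 1, l, level =>
    match l with
    | [] => []
    | c :: rest =>
      if level = 0 then
        if group.isPrefixOf (c :: rest) then pvGoBF group pattern fuel ((c :: rest).drop group.length) 1
        else c :: pvGoBF group pattern fuel rest 0
      else
        if c = '\\' then pvGoBF group pattern fuel rest.tail level
        else if c = '(' then pvGoBF group pattern fuel rest (level + 1)
        else if c = ')' then
          (if level = 1 then pattern ++ pvGoBF group pattern fuel rest 0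
           else pvGoBF group pattern fuel rest (level - 1))
        else pvGoBF group pattern fuel rest level

def replace_re_group_alt (expr : String) (group : String) (pattern : String) : String :=
  String.ofList (pvGoBF group.toList pattern.toList (2 * expr.toList.length + 2) expr.toList 0)

-- ===== PRECONDITION & SPEC =====
def Spec_replace_re_group (expr : String) (group : String) (pattern : String) (out : String) : Prop := out = replace_re_group_alt expr group pattern
instance (expr : String) (group : String) (pattern : String) (out : String) : Decidable (Spec_replace_re_group expr group pattern out) := by unfold Spec_replace_re_group; infer_instance

-- ===== CLAIM (what is proved, stated in full; the proofs are below) =====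
def Claim_equal_replace_re_group : Prop := ∀ (expr : String) (group : String) (pattern : String), Dom_replace_re_group expr group pattern → Spec_replace_re_group expr group pattern (replace_re_group expr group pattern)

-- ===== LEMMAS AND PROOFS =====

-- the termination measure of B's loop: a zero-length group match keeps the
-- string but flips level 0 → 1, every other step consumes a character
def pvGoBmeas (l : List Char) (level : Int) : Nat :=
  2 * l.length + (if level = 0 then 1 else 0)

-- with enough fuel on both sides, pvGoBF does not depend on the fuel
theorem pvGoBF_fuel (g p : List Char) : ∀ (f1 : Nat) (l : List Char) (level : Int) (f2 : Nat),
    pvGoBmeas l level ≤ f1 → pvGoBmeas l level ≤ f2 →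
    pvGoBF g p f1 l level = pvGoBF g p f2 l level := by
  intro f1
  induction f1 with
  | zero =>
    intro l level f2 h1 _
    match l with
    | [] => cases f2 <;> simp [pvGoBF]
    | c :: t => simp [pvGoBmeas] at h1
  | succ f1 ih =>
    intro l level f2 h1 h2
    match l with
    | [] => cases f2 <;> simp [pvGoBF]
    | c :: t =>
      have hm : 2 * t.length + 2 ≤ pvGoBmeas (c :: t) level := by
        simp [pvGoBmeas]; split <;> omega
      obtain ⟨f2', rfl⟩ : ∃ f2', f2 = f2' + 1 := by
        cases f2 with
        | zero => exfalso; omega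
        | succ m => exact ⟨m, rfl⟩
      rw [pvGoBF, pvGoBF]
      by_cases h0 : level = 0
      · simp only [h0, reduceIte]
        by_cases hp : g.isPrefixOf (c :: t) = true
        · simp only [hp, reduceIte]
          exact ih _ 1 f2' (by simp [pvGoBmeas, h0] at *; omega) (by simp [pvGoBmeas, h0] at *; omega)
        · simp only [hp, Bool.false_eq_true]
          simp only [reduceIte]
          exact congrArg (c :: ·)
            (ih t 0 f2' (by simp [pvGoBmeas, h0] at *; omega) (by simp [pvGoBmeas, h0] at *; omega))
      · simp only [h0, reduceIte]
        have hm' : ∀ lv : Int, pvGoBmeas t lv ≤ 2 * t.length + 1 := by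
          intro lv; simp [pvGoBmeas]; split <;> omega
        have hmt : ∀ lv : Int, pvGoBmeas t.tail lv ≤ 2 * t.length + 1 := by
          intro lv; simp [pvGoBmeas, List.length_tail]; split <;> omega
        by_cases hb : c = '\\'
        · simp only [hb, reduceIte]
          exact ih t.tail level f2' (by have := hmt level; omega) (by have := hmt level; omega)
        · simp only [hb, reduceIte]
          by_cases ho : c = '('
          · simp only [ho, reduceIte]
            exact ih t (level + 1) f2' (by have := hm' (level + 1); omega) (by have := hm' (level + 1); omega)
          · simp only [ho, reduceIte]
            by_cases hc : c = ')'
            · simp only [hc, reduceIte]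
              by_cases h1' : level = 1
              · simp only [h1', reduceIte]
                exact congrArg (p ++ ·)
                  (ih t 0 f2' (by have := hm' 0; omega) (by have := hm' 0; omega))
              · simp only [h1', reduceIte]
                exact ih t (level - 1) f2' (by have := hm' (level - 1); omega) (by have := hm' (level - 1); omega)
            · simp only [hc, reduceIte]
              exact ih t level f2' (by have := hm' level; omega) (by have := hm' level; omega)

-- A's inner loop never returns a suffix at least as long as its input
theorem pvInnerA_some_length (l : List Char) (level : Int) (rest : List Char)
    (h : pvInnerA l level = some rest) : rest.length < l.length := by
  have H : ∀ (n : Nat) (l : List Char), l.length ≤ n → ∀ (level : Int) (rest : List Char),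
      pvInnerA l level = some rest → rest.length < l.length := by
    intro n
    induction n with
    | zero =>
      intro l hl level rest h
      have : l = [] := List.length_eq_zero_iff.mp (by omega)
      simp [this, pvInnerA] at h
    | succ n ih =>
      intro l hl level rest h
      match l with
      | [] => simp [pvInnerA] at h
      | c :: t =>
        rw [pvInnerA.eq_def] at h
        simp only [] at h
        have ht : t.length ≤ n := by simp at hl; omega
        split_ifs at h with h1 h2 h3 h4
        · match t with
          | [] => simp at h
          | _ :: r2 =>
            have := ih r2 (by simp at ht ⊢; omega) level rest h
            simp at this ⊢; omega
        · have := ih t ht _ rest h; simp; omega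
        · simp at h; subst h; simp
        · have := ih t ht _ rest h; simp; omega
        · have := ih t ht _ rest h; simp; omega
  exact H l.length l le_rfl level rest h

-- B at level ≥ 1 computes exactly what A's inner loop does: nothing if the group
-- is never closed, else (pattern ++ continuation at level 0) after the close.
theorem pvGoB_inner (g p : List Char) : ∀ (fuel : Nat) (l : List Char) (level : Int),
    1 ≤ level → 2 * l.length ≤ fuel →
    pvGoBF g p fuel l level = (match pvInnerA l level with
      | none => []
      | some rest => p ++ pvGoBF g p (2 * rest.length + 2) rest 0) := by
  intro fuel
  induction fuel with
  | zero =>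
    intro l level _ hf
    have : l = [] := List.length_eq_zero_iff.mp (by omega)
    simp [this, pvGoBF, pvInnerA]
  | succ fuel ih =>
    intro l level hlev hf
    match l with
    | [] => simp [pvGoBF, pvInnerA]
    | c :: t =>
      rw [pvGoBF, pvInnerA.eq_def]
      have ht : 2 * t.length ≤ fuel := by simp at hf; omega
      have hne : ¬ level = 0 := by omega
      simp only [hne, reduceIte]
      by_cases h1 : c = '\\'
      · simp only [h1, reduceIte]
        match t with
        | [] => cases fuel <;> simp [pvGoBF]
        | _ :: r2 =>
          have : 2 * r2.length ≤ fuel := by simp at ht ⊢; omega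
          rw [List.tail_cons]
          exact ih r2 level hlev this
      · simp only [h1, reduceIte]
        by_cases h2 : c = '('
        · simp only [h2, reduceIte]
          exact ih t (level + 1) (by omega) ht
        · simp only [h2, reduceIte]
          by_cases h3 : c = ')'
          · simp only [h3, reduceIte]
            by_cases h4 : level = 1
            · simp only [h4, reduceIte]
              exact congrArg (p ++ ·)
                (pvGoBF_fuel g p fuel t 0 (2 * t.length + 2)
                  (by simp [pvGoBmeas]; simp at hf; omega) (by simp [pvGoBmeas]))
            · have h5 : ¬ (level - 1 = 0) := by omega
              simp only [h4, h5, reduceIte]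
              exact ih t (level - 1) (by omega) ht
          · simp only [h3, reduceIte]
            exact ih t level hlev ht

-- if the group occurs nowhere in l, B at level 0 copies l verbatim
theorem pvGoB_no_match (g p : List Char) : ∀ (fuel : Nat) (l : List Char),
    2 * l.length < fuel → (∀ i, ¬ g <+: l.drop i) →
    pvGoBF g p fuel l 0 = l := by
  intro fuel
  induction fuel with
  | zero => intro l h _; omega
  | succ fuel ih =>
    intro l hf h
    match l with
    | [] => simp [pvGoBF]
    | c :: t =>
      rw [pvGoBF]
      have h0 : ¬ g.isPrefixOf (c :: t) = true := by
        intro hp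
        exact h 0 (by simpa using (List.isPrefixOf_iff_prefix.mp hp))
      simp [h0]
      exact ih t (by simp at hf; omega) (fun i => h (i + 1))

-- the first occurrence of the group at position n splits B's level-0 scan
theorem pvGoB_match (g p : List Char) : ∀ (n : Nat) (l : List Char) (fuel : Nat),
    (∀ i, i < n → ¬ g <+: l.drop i) → g <+: l.drop n → 2 * l.length < fuel →
    pvGoBF g p fuel l 0 =
      l.take n ++ pvGoBF g p (2 * (l.drop (n + g.length)).length + 2) (l.drop (n + g.length)) 1 := by
  intro n
  induction n with
  | zero =>
    intro l fuel _ hpre hf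
    match l with
    | [] =>
      have : g = [] := List.prefix_nil.mp (by simpa using hpre)
      cases fuel <;> simp [pvGoBF, this]
    | c :: t =>
      obtain ⟨f, rfl⟩ : ∃ f, fuel = f + 1 := by
        cases fuel with
        | zero => exfalso; omega
        | succ m => exact ⟨m, rfl⟩
      have hp : g.isPrefixOf (c :: t) = true := List.isPrefixOf_iff_prefix.mpr (by simpa using hpre)
      rw [pvGoBF]
      simp only [hp, reduceIte]
      simp only [List.take_zero, List.nil_append, Nat.zero_add]
      exact pvGoBF_fuel g p f _ 1 _
        (by simp [pvGoBmeas]; simp at hf; omega) (by simp [pvGoBmeas])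
  | succ n ih =>
    intro l fuel hlt hpre hf
    match l with
    | [] =>
      exfalso
      have hg : g = [] := List.prefix_nil.mp (by simpa using hpre)
      exact hlt 0 (by omega) (by simp [hg])
    | c :: t =>
      obtain ⟨f, rfl⟩ : ∃ f, fuel = f + 1 := by
        cases fuel with
        | zero => exfalso; omega
        | succ m => exact ⟨m, rfl⟩
      rw [pvGoBF]
      have h0 : ¬ g.isPrefixOf (c :: t) = true := by
        intro hp
        exact hlt 0 (by omega) (by simpa using (List.isPrefixOf_iff_prefix.mp hp))
      simp [h0]
      rw [ih t f (fun i hi => hlt (i + 1) (by omega)) (by simpa using hpre) (by simp at hf; omega)]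
      have harith : n + 1 + g.length = (n + g.length) + 1 := by omega
      simp [harith, List.drop_succ_cons]

-- main bridge: A's outer loop with accumulator r equals r ++ B's flat scan
theorem pvOuterA_eq (g p : List Char) : ∀ (fuel : Nat) (l : List Char), l.length < fuel →
    ∀ (r : List Char),
    pvOuterAF g p fuel r l = r ++ pvGoBF g p (2 * l.length + 2) l 0 := by
  intro fuel
  induction fuel with
  | zero => intro l h; omega
  | succ fuel ih =>
    intro l hl r
    rw [pvOuterAF]
    by_cases hnil : l = []
    · subst hnil; simp [pvGoBF]
    · rw [if_neg hnil]
      by_cases hfind : PySem.Chars.find l g = -1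
      · rw [if_pos hfind]
        rw [pvGoB_no_match g p _ l (by omega)]
        intro i hpre
        exact (PySem.Chars.find_eq_neg_one_iff l g).mp hfind
          ((PySem.Chars.isIn_iff_infix g l).mp
            ((PySem.Chars.exists_prefix_drop_iff_isIn g l).mp ⟨i, hpre⟩))
      · rw [if_neg hfind]
        have hnn : 0 ≤ PySem.Chars.find l g := by
          have := PySem.Chars.neg_one_le_find l g; omega
        obtain ⟨hpre, hmin⟩ := PySem.Chars.find_spec (s := l) (sub := g) hnn
        rw [pvGoB_match g p (PySem.Chars.find l g).toNat l _ (fun i hi => hmin i hi) hpre (by omega),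
          pvGoB_inner g p _ _ 1 (by omega) (by omega)]
        split
        · next h2 =>
          simp
        · next rest h2 =>
          have hlen : rest.length < fuel := by
            have h3 := pvInnerA_some_length _ _ _ h2
            have h4 : (l.drop ((PySem.Chars.find l g).toNat + g.length)).length ≤ l.length := by
              simp
            omega
          rw [ih rest hlen (r ++ l.take (PySem.Chars.find l g).toNat ++ p)]
          simp

-- ===== VERDICT (by name: the statement is the Claim_ definition above) =====
theorem replace_re_group_spec : Claim_equal_replace_re_group := by
  intro expr group pattern _
  unfold Spec_replace_re_group replace_re_group replace_re_group_alt
  rw [pvOuterA_eq group.toList pattern.toList (expr.toList.length + 1) expr.toList (by omega)]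
  simp
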